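-- pv_equiv track=rewrite | github.com/claws-lab/multimodal-robustness | multimodal_model/main.py | AlignFormatLabels
-- ===== SOURCE A (Python) =====
-- def AlignFormatLabels(label_dict, labels):
-- 	updated_dict = {}
-- 	for tweet_id in label_dict.keys():
-- 		if label_dict[tweet_id] == 'vehicle_damage':
-- 			updated_dict[tweet_id] = 'infrastructure_and_utility_damage'
-- 		elif label_dict[tweet_id] == 'missing_or_found_people' or label_dict[tweet_id] == 'injured_or_dead_people':
-- 			updated_dict[tweet_id] = 'affected_individuals'
-- 		else:
-- 			updated_dict[tweet_id] = label_dict[tweet_id]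
-- 	return updated_dict
-- ===== SOURCE B (Python) =====
-- RULES = [
--     ('vehicle_damage', 'infrastructure_and_utility_damage'),
--     ('missing_or_found_people', 'affected_individuals'),
--     ('injured_or_dead_people', 'affected_individuals'),
-- ]
--
-- def AlignFormatLabels(label_dict, labels):
--     # Staged rewriting: apply each rename rule in its own full pass over the
--     # items; correct because no rule's target is another rule's source.
--     items = list(label_dict.items())
--     for old, new in RULES:
--         items = [(tid, new if v == old else v) for tid, v in items]
--     return dict(items)
-- ===== Notes on version B (the rewrite author's own statement) =====
-- stated objective: alternative
-- what changed: Replaces the per-key if/elif cascade inside one dict-building loop by staged rewriting: a list of rename rules is applied in three successive full passes over the items (one substitution per pass), then the result is rebuilt as a dict; correct because no rule's target is another rule's source.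
import Mathlib
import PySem

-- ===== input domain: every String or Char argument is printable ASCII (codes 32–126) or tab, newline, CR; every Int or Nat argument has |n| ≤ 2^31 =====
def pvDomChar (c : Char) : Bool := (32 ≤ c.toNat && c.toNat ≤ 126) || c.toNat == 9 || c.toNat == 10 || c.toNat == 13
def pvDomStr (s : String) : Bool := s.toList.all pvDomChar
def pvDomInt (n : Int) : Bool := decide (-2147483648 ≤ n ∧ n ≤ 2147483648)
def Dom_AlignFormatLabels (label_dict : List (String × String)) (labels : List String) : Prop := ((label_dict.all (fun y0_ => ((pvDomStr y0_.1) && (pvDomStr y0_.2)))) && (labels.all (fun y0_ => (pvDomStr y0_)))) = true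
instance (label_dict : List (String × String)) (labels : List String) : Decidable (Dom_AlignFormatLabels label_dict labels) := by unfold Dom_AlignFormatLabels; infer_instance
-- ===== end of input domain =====

-- B applies the three rename rules as staged full passes over the items (rule list + repeated substitution) instead of A's per-key if/elif cascade; equivalence of return values.


-- ===== PORT A =====
-- for tweet_id in label_dict.keys(): lookup label_dict[tweet_id] — tweet_id is always a key,
-- so the lookup never raises; getD with "" is exact here.
def AlignFormatLabels (label_dict : List (String × String)) (labels : List String) : List (String × String) :=
  let d := PySem.Dict.ofList label_dict
  let updated := d.keys.foldl (fun updated tweet_id =>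
    if d.getD tweet_id "" == "vehicle_damage" then
      updated.insert tweet_id "infrastructure_and_utility_damage"
    else if d.getD tweet_id "" == "missing_or_found_people" || d.getD tweet_id "" == "injured_or_dead_people" then
      updated.insert tweet_id "affected_individuals"
    else
      updated.insert tweet_id (d.getD tweet_id "")) PySem.Dict.empty
  updated.items

-- ===== PORT B =====
def pvRULES : List (String × String) :=
  [("vehicle_damage", "infrastructure_and_utility_damage"),
   ("missing_or_found_people", "affected_individuals"),
   ("injured_or_dead_people", "affected_individuals")]

-- staged rewriting: one full pass per rule, then dict(items)
def AlignFormatLabels_alt (label_dict : List (String × String)) (labels : List String) : List (String × String) :=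
  let items0 := (PySem.Dict.ofList label_dict).items
  let items := pvRULES.foldl
    (fun its rule => its.map (fun p => (p.1, if p.2 == rule.1 then rule.2 else p.2))) items0
  (PySem.Dict.ofList items).items

-- ===== PRECONDITION & SPEC =====
def Spec_AlignFormatLabels (label_dict : List (String × String)) (labels : List String) (out : List (String × String)) : Prop := out = AlignFormatLabels_alt label_dict labels
instance (label_dict : List (String × String)) (labels : List String) (out : List (String × String)) : Decidable (Spec_AlignFormatLabels label_dict labels out) := by unfold Spec_AlignFormatLabels; infer_instance

-- ===== CLAIM =====
def Claim_equal_AlignFormatLabels : Prop := ∀ (label_dict : List (String × String)) (labels : List String), Dom_AlignFormatLabels label_dict labels → Spec_AlignFormatLabels label_dict labels (AlignFormatLabels label_dict labels)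

-- ===== LEMMAS AND PROOFS =====

-- A's cascade as a value function
def pvRemapVal (v : String) : String :=
  if v == "vehicle_damage" then "infrastructure_and_utility_damage"
  else if v == "missing_or_found_people" || v == "injured_or_dead_people" then "affected_individuals"
  else v

-- the three staged substitutions compose to A's cascade
theorem pvStaged_eq (v : String) :
    (if (if (if v == "vehicle_damage" then "infrastructure_and_utility_damage" else v) == "missing_or_found_people"
         then "affected_individuals"
         else (if v == "vehicle_damage" then "infrastructure_and_utility_damage" else v)) == "injured_or_dead_people"
     then "affected_individuals"
     else (if (if v == "vehicle_damage" then "infrastructure_and_utility_damage" else v) == "missing_or_found_people"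
           then "affected_individuals"
           else (if v == "vehicle_damage" then "infrastructure_and_utility_damage" else v))) = pvRemapVal v := by
  by_cases h1 : v = "vehicle_damage" <;> by_cases h2 : v = "missing_or_found_people" <;>
    by_cases h3 : v = "injured_or_dead_people" <;>
      simp [pvRemapVal, h1, h2, h3]

-- dict(items) is the identity on an items list with unique keys
theorem pv_ofList_items_nodup {l : List (String × String)} (h : (l.map Prod.fst).Nodup) :
    (PySem.Dict.ofList l).items = l := by
  have := PySem.Dict.items_foldl_insert_fresh (l := l) (k := Prod.fst) (v := Prod.snd)
      (d := PySem.Dict.empty) (fun a _ => PySem.Dict.contains_empty a.1) h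
  simpa [PySem.Dict.ofList, PySem.Dict.update] using this

theorem AlignFormatLabels_spec : Claim_equal_AlignFormatLabels := by
  intro label_dict labels _
  unfold Spec_AlignFormatLabels AlignFormatLabels AlignFormatLabels_alt
  set d := PySem.Dict.ofList label_dict with hd
  have hnd : d.keys.Nodup := PySem.Dict.nodup_keys_ofList label_dict
  -- B: unfold the three staged passes into one map
  have hB :
      pvRULES.foldl (fun its rule => its.map (fun p => (p.1, if p.2 == rule.1 then rule.2 else p.2))) d.items
        = d.items.map (fun p => (p.1, pvRemapVal p.2)) := by
    simp only [pvRULES, List.foldl, List.map_map]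
    apply List.map_congr_left
    intro p _
    simp only [Function.comp]
    exact congrArg (fun w => (p.1, w)) (pvStaged_eq p.2)
  simp only []
  rw [hB]
  -- the mapped items keep the unique keys, so dict() is the identity on them
  have hkeys : ((d.items.map (fun p => (p.1, pvRemapVal p.2))).map Prod.fst).Nodup := by
    simpa [List.map_map, Function.comp, PySem.Dict.keys] using hnd
  rw [pv_ofList_items_nodup hkeys]
  -- A: insert-loop over fresh distinct keys appends
  have hbody : (fun (updated : PySem.Dict String String) tweet_id =>
      if d.getD tweet_id "" == "vehicle_damage" then
        updated.insert tweet_id "infrastructure_and_utility_damage"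
      else if d.getD tweet_id "" == "missing_or_found_people" || d.getD tweet_id "" == "injured_or_dead_people" then
        updated.insert tweet_id "affected_individuals"
      else
        updated.insert tweet_id (d.getD tweet_id "")) =
      (fun updated tweet_id => updated.insert tweet_id (pvRemapVal (d.getD tweet_id ""))) := by
    funext u t
    unfold pvRemapVal
    split_ifs <;> rfl
  simp only [hbody]
  have h := PySem.Dict.items_foldl_insert_fresh d.keys (fun a => a)
      (fun a => pvRemapVal (d.getD a "")) PySem.Dict.empty
      (fun a _ => PySem.Dict.contains_empty a) (by simpa using hnd)
  rw [h]
  rw [PySem.Dict.items_eq_map_keys d hnd "", List.map_map]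
  simp [Function.comp_def, PySem.Dict.empty, PySem.Dict.items]
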